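-- pv_equiv track=rewrite | github.com/Th0rgal/verity | scripts/check_axioms.py | classify_axioms
-- ===== SOURCE A (Python) =====
-- LEAN_BUILTIN_AXIOMS = frozenset([
--     "propext",
--     "Quot.sound",
--     "Classical.choice",
-- ])
--
-- DOCUMENTED_AXIOMS = frozenset([
--     "keccak256_first_4_bytes",
--     "solidityMappingSlot_lt_evmModulus",
--     "solidityMappingSlot_add_wordOffset_lt_evmModulus",
-- ])
--
-- FORBIDDEN_AXIOMS = frozenset([
--     "sorryAx",
-- ])
--
-- def classify_axioms(
--     axiom_map: dict[str, list[str]],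
-- ) -> tuple[set[str], set[str], set[str], dict[str, list[str]]]:
--     """Classify axioms into builtin, documented, forbidden, and unexpected."""
--     all_axioms: set[str] = set()
--     for axioms in axiom_map.values():
--         all_axioms.update(axioms)
--
--     builtin = all_axioms & LEAN_BUILTIN_AXIOMS
--     documented = all_axioms & DOCUMENTED_AXIOMS
--     forbidden = all_axioms & FORBIDDEN_AXIOMS
--     unexpected = all_axioms - LEAN_BUILTIN_AXIOMS - DOCUMENTED_AXIOMS - FORBIDDEN_AXIOMS
--
--     unexpected_usage: dict[str, list[str]] = {}
--     for axiom in unexpected: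
--         unexpected_usage[axiom] = [
--             theorem for theorem, axioms in axiom_map.items() if axiom in axioms
--         ]
--
--     return builtin, documented, forbidden, unexpected_usage
-- ===== SOURCE B (Python) =====
-- LEAN_BUILTIN_AXIOMS = frozenset([
--     "propext",
--     "Quot.sound",
--     "Classical.choice",
-- ])
--
-- DOCUMENTED_AXIOMS = frozenset([
--     "keccak256_first_4_bytes",
--     "solidityMappingSlot_lt_evmModulus",
--     "solidityMappingSlot_add_wordOffset_lt_evmModulus",
-- ])
--
-- FORBIDDEN_AXIOMS = frozenset([
--     "sorryAx",
-- ])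
--
--
-- def classify_axioms(
--     axiom_map: dict[str, list[str]],
-- ) -> tuple[set[str], set[str], set[str], dict[str, list[str]]]:
--     """Classify axioms in one routing pass over axiom_map, no universe set."""
--     builtin: set[str] = set()
--     documented: set[str] = set()
--     forbidden: set[str] = set()
--     unexpected_usage: dict[str, list[str]] = {}
--     for theorem, axioms in axiom_map.items():
--         for axiom in dict.fromkeys(axioms):  # dedup: one hit per axiom per theorem
--             if axiom in LEAN_BUILTIN_AXIOMS:
--                 builtin.add(axiom)
--             elif axiom in DOCUMENTED_AXIOMS:
--                 documented.add(axiom)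
--             elif axiom in FORBIDDEN_AXIOMS:
--                 forbidden.add(axiom)
--             else:
--                 unexpected_usage.setdefault(axiom, []).append(theorem)
--     return builtin, documented, forbidden, unexpected_usage
-- ===== Notes on version B (the rewrite author's own statement) =====
-- stated objective: faster
-- what changed: B drops A's universe set, the four set-algebra operations and the per-unexpected-axiom rescan of axiom_map, classifying each axiom directly in a single routing pass over axiom_map.items() that maintains the three sets and the unexpected-usage dict incrementally (with a per-theorem dedup so one theorem is recorded at most once per axiom).
import Mathlib
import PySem

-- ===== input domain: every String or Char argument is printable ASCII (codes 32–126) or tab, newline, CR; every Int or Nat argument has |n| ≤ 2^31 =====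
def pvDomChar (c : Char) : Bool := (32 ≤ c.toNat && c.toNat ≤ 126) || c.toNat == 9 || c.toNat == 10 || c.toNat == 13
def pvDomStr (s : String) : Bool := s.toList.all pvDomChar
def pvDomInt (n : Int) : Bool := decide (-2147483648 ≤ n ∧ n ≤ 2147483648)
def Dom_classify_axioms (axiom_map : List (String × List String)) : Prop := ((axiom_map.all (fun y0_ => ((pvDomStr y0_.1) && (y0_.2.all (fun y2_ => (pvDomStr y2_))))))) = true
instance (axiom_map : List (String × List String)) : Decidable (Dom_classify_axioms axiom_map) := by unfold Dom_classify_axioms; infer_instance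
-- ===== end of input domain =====

-- B replaces A's universe set, four set-algebra passes and nested rescan by one routing pass
-- over axiom_map that classifies each (per-theorem deduplicated) axiom directly in one pass, removing the per-unexpected-axiom rescan (objective: faster, measured).

def pvBuiltinAxioms : List String := ["propext", "Quot.sound", "Classical.choice"]
def pvDocumentedAxioms : List String :=
  ["keccak256_first_4_bytes", "solidityMappingSlot_lt_evmModulus",
   "solidityMappingSlot_add_wordOffset_lt_evmModulus"]
def pvForbiddenAxioms : List String := ["sorryAx"]

-- ===== PORT A =====
-- builds the universe set, intersects/differences it with the three constant sets,
-- then rescans axiom_map for every unexpected axiom.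
def classify_axioms (axiom_map : List (String × List String)) : List String × List String × List String × (List (String × List String)) :=
  let all_axioms : PySem.Set String :=
    axiom_map.foldl (fun s p => PySem.Set.update s p.2) PySem.Set.empty
  let builtin := PySem.Set.inter all_axioms pvBuiltinAxioms
  let documented := PySem.Set.inter all_axioms pvDocumentedAxioms
  let forbidden := PySem.Set.inter all_axioms pvForbiddenAxioms
  let unexpected :=
    PySem.Set.diff (PySem.Set.diff (PySem.Set.diff all_axioms pvBuiltinAxioms)
      pvDocumentedAxioms) pvForbiddenAxioms
  let unexpected_usage : PySem.Dict String (List String) :=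
    unexpected.foldl
      (fun d ax =>
        d.insert ax ((axiom_map.filter (fun p => p.2.contains ax)).map (·.1)))
      PySem.Dict.empty
  (builtin, documented, forbidden, unexpected_usage.items)

-- ===== PORT B =====
-- single routing pass: for each theorem, each deduplicated axiom is added to the matching
-- set or appended (with its theorem) to the unexpected-usage dict.
def classify_axioms_alt (axiom_map : List (String × List String)) : List String × List String × List String × (List (String × List String)) :=
  let st :=
    axiom_map.foldl
      (fun st p =>
        (PySem.List.dedup p.2).foldl
          (fun st ax =>
            if pvBuiltinAxioms.contains ax then
              (PySem.Set.add st.1 ax, st.2.1, st.2.2.1, st.2.2.2)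
            else if pvDocumentedAxioms.contains ax then
              (st.1, PySem.Set.add st.2.1 ax, st.2.2.1, st.2.2.2)
            else if pvForbiddenAxioms.contains ax then
              (st.1, st.2.1, PySem.Set.add st.2.2.1 ax, st.2.2.2)
            else
              (st.1, st.2.1, st.2.2.1, st.2.2.2.modify ax [] (· ++ [p.1])))
          st)
      ((PySem.Set.empty : PySem.Set String), (PySem.Set.empty : PySem.Set String),
       (PySem.Set.empty : PySem.Set String), (PySem.Dict.empty : PySem.Dict String (List String)))
  (st.1, st.2.1, st.2.2.1, st.2.2.2.items)

-- ===== PRECONDITION & SPEC =====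
def Spec_classify_axioms (axiom_map : List (String × List String)) (out : List String × List String × List String × (List (String × List String))) : Prop := out = classify_axioms_alt axiom_map
instance (axiom_map : List (String × List String)) (out : List String × List String × List String × (List (String × List String))) : Decidable (Spec_classify_axioms axiom_map out) := by unfold Spec_classify_axioms; infer_instance

-- ===== CLAIM (what is proved, stated in full; the proofs are below) =====
def Claim_equal_classify_axioms : Prop := ∀ (axiom_map : List (String × List String)), Dom_classify_axioms axiom_map → Spec_classify_axioms axiom_map (classify_axioms axiom_map)

-- ===== LEMMAS AND PROOFS =====

-- the three routing conditions
def pvC1 (ax : String) : Bool := pvBuiltinAxioms.contains ax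
def pvC2 (ax : String) : Bool := pvDocumentedAxioms.contains ax
def pvC3 (ax : String) : Bool := pvForbiddenAxioms.contains ax
def pvCU (ax : String) : Bool := !pvC1 ax && !pvC2 ax && !pvC3 ax

-- flattened axiom streams
def pvG (l : List (String × List String)) : List String := l.flatMap (·.2)
def pvF (l : List (String × List String)) : List String :=
  l.flatMap (fun p => PySem.List.dedup p.2)
def pvP (l : List (String × List String)) : List (String × String) :=
  l.flatMap (fun p => (PySem.List.dedup p.2).map (fun ax => (p.1, ax)))

-- B's routing step on a (theorem, axiom) pair
def pvStep (st : PySem.Set String × PySem.Set String × PySem.Set String × PySem.Dict String (List String))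
    (pr : String × String) :
    PySem.Set String × PySem.Set String × PySem.Set String × PySem.Dict String (List String) :=
  if pvBuiltinAxioms.contains pr.2 then
    (PySem.Set.add st.1 pr.2, st.2.1, st.2.2.1, st.2.2.2)
  else if pvDocumentedAxioms.contains pr.2 then
    (st.1, PySem.Set.add st.2.1 pr.2, st.2.2.1, st.2.2.2)
  else if pvForbiddenAxioms.contains pr.2 then
    (st.1, st.2.1, PySem.Set.add st.2.2.1 pr.2, st.2.2.2)
  else
    (st.1, st.2.1, st.2.2.1, st.2.2.2.modify pr.2 [] (· ++ [pr.1]))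

-- componentwise forms of the step
def pvStepB (s : PySem.Set String) (pr : String × String) : PySem.Set String :=
  if pvC1 pr.2 then PySem.Set.add s pr.2 else s
def pvStepD (s : PySem.Set String) (pr : String × String) : PySem.Set String :=
  if pvC1 pr.2 then s else if pvC2 pr.2 then PySem.Set.add s pr.2 else s
def pvStepF (s : PySem.Set String) (pr : String × String) : PySem.Set String :=
  if pvC1 pr.2 then s else if pvC2 pr.2 then s
  else if pvC3 pr.2 then PySem.Set.add s pr.2 else s
def pvStepU (d : PySem.Dict String (List String)) (pr : String × String) :
    PySem.Dict String (List String) :=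
  if pvCU pr.2 then d.modify pr.2 [] (· ++ [pr.1]) else d

theorem pvStep_eq (st : PySem.Set String × PySem.Set String × PySem.Set String × PySem.Dict String (List String)) (pr : String × String) :
    pvStep st pr = (pvStepB st.1 pr, pvStepD st.2.1 pr, pvStepF st.2.2.1 pr, pvStepU st.2.2.2 pr) := by
  unfold pvStep pvStepB pvStepD pvStepF pvStepU pvCU pvC1 pvC2 pvC3
  by_cases h1 : pvBuiltinAxioms.contains pr.2 = true <;>
    by_cases h2 : pvDocumentedAxioms.contains pr.2 = true <;>
      by_cases h3 : pvForbiddenAxioms.contains pr.2 = true <;>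
        (simp only [List.contains_eq_mem, decide_eq_true_eq] at h1 h2 h3; simp [h1, h2, h3])

theorem pvFoldl_split (l : List (String × String))
    (a b c : PySem.Set String) (d : PySem.Dict String (List String)) :
    l.foldl pvStep (a, b, c, d) =
      (l.foldl pvStepB a, l.foldl pvStepD b, l.foldl pvStepF c, l.foldl pvStepU d) := by
  induction l generalizing a b c d with
  | nil => rfl
  | cons pr l ih => simp only [List.foldl_cons, pvStep_eq]; exact ih _ _ _ _

-- B's fold equals the flat fold over pvP
theorem pvAlt_flat (l : List (String × List String))
    (st : PySem.Set String × PySem.Set String × PySem.Set String × PySem.Dict String (List String)) :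
    l.foldl
      (fun st p =>
        (PySem.List.dedup p.2).foldl
          (fun st ax =>
            if pvBuiltinAxioms.contains ax then
              (PySem.Set.add st.1 ax, st.2.1, st.2.2.1, st.2.2.2)
            else if pvDocumentedAxioms.contains ax then
              (st.1, PySem.Set.add st.2.1 ax, st.2.2.1, st.2.2.2)
            else if pvForbiddenAxioms.contains ax then
              (st.1, st.2.1, PySem.Set.add st.2.2.1 ax, st.2.2.2)
            else
              (st.1, st.2.1, st.2.2.1, st.2.2.2.modify ax [] (· ++ [p.1])))
          st)
      st = (pvP l).foldl pvStep st := by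
  induction l generalizing st with
  | nil => rfl
  | cons p l ih =>
      rw [List.foldl_cons, ih]
      simp only [pvP, List.flatMap_cons, List.foldl_append, List.foldl_map]
      rfl

-- ofList commutes with filter
theorem pvOfList_filter (p : String → Bool) (l : List String) :
    PySem.Set.ofList (l.filter p) = (PySem.Set.ofList l).filter p := by
  induction l using List.reverseRecOn with
  | nil => rfl
  | append_singleton l x ih =>
      rw [List.filter_append, PySem.Set.ofList_append_singleton]
      by_cases hp : p x = true
      · simp only [List.filter_cons, hp, if_pos, List.filter_nil]
        rw [PySem.Set.ofList_append_singleton]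
        show PySem.Set.add (PySem.Set.ofList (l.filter p)) x = _
        by_cases hx : x ∈ l
        · have h1 : (PySem.Set.ofList (l.filter p)).contains x = true := by
            rw [PySem.Set.contains_iff, PySem.Set.mem_ofList]
            exact List.mem_filter.mpr ⟨hx, hp⟩
          have h2 : (PySem.Set.ofList l).contains x = true := by
            rw [PySem.Set.contains_iff, PySem.Set.mem_ofList]; exact hx
          show (if _ then _ else _) = _
          rw [h1, if_pos rfl]
          show _ = List.filter p (if _ then _ else _)
          rw [h2, if_pos rfl, ih]
        · have h1 : (PySem.Set.ofList (l.filter p)).contains x = false := by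
            rw [Bool.eq_false_iff, Ne, PySem.Set.contains_iff, PySem.Set.mem_ofList]
            intro h; exact hx (List.mem_filter.mp h).1
          have h2 : (PySem.Set.ofList l).contains x = false := by
            rw [Bool.eq_false_iff, Ne, PySem.Set.contains_iff, PySem.Set.mem_ofList]
            exact hx
          show (if _ then _ else _) = _
          rw [h1, if_neg (by simp)]
          show _ = List.filter p (if _ then _ else _)
          rw [h2, if_neg (by simp), List.filter_append, ih]
          simp [hp]
      · simp only [List.filter_cons, hp]
        show PySem.Set.ofList (l.filter p ++ []) = _
        rw [List.append_nil, ih]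
        show _ = List.filter p (if _ then _ else _)
        by_cases hx : (PySem.Set.ofList l).contains x = true
        · rw [hx, if_pos rfl]
        · rw [Bool.not_eq_true] at hx
          rw [hx, if_neg (by simp), List.filter_append]
          simp [hp]

-- updating with a deduplicated list = updating with the list itself
theorem pvUpdate_dedup (s : PySem.Set String) (as : List String) :
    PySem.Set.update s (PySem.List.dedup as) = PySem.Set.update s as := by
  rw [PySem.List.dedup_eq_ofList, PySem.Set.update_eq_append_filter,
    PySem.Set.update_eq_append_filter, PySem.Set.ofList_ofList]

theorem pvUpdate_F_eq_G (l : List (String × List String)) (s : PySem.Set String) :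
    PySem.Set.update s (pvF l) = PySem.Set.update s (pvG l) := by
  induction l generalizing s with
  | nil => rfl
  | cons p l ih =>
      simp only [pvF, pvG, List.flatMap_cons, PySem.Set.update_append]
      rw [pvUpdate_dedup]; exact ih _

-- per-theorem dedup does not change the universe set
theorem pvOfList_F_eq_G (l : List (String × List String)) :
    PySem.Set.ofList (pvF l) = PySem.Set.ofList (pvG l) := by
  rw [← PySem.Set.update_nil_left, ← PySem.Set.update_nil_left, pvUpdate_F_eq_G]

-- conditional add fold = set-of-filtered-stream
theorem pvFold_cond_add (p : String → Bool) (l : List String) :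
    l.foldl (fun s ax => if p ax then PySem.Set.add s ax else s) PySem.Set.empty
      = PySem.Set.ofList (l.filter p) := by
  rw [← List.foldl_filter]
  rfl

-- disjointness of the constant condition lists
theorem pvC2_imp_not_C1 (ax : String) : pvC2 ax = true → pvC1 ax = false := by
  unfold pvC1 pvC2 pvBuiltinAxioms pvDocumentedAxioms
  intro h
  simp only [List.contains_eq_mem, decide_eq_true_eq, List.mem_cons,
    List.not_mem_nil, or_false] at h ⊢
  rcases h with h | h | h <;> subst h <;> decide

theorem pvC3_imp_not_C12 (ax : String) :
    pvC3 ax = true → pvC1 ax = false ∧ pvC2 ax = false := by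
  unfold pvC1 pvC2 pvC3 pvBuiltinAxioms pvDocumentedAxioms pvForbiddenAxioms
  intro h
  simp only [List.contains_eq_mem, decide_eq_true_eq, List.mem_cons,
    List.not_mem_nil, or_false] at h
  subst h; constructor <;> decide


-- combined else-branch conditions
def pvCD (ax : String) : Bool := !pvC1 ax && pvC2 ax
def pvCF (ax : String) : Bool := !pvC1 ax && !pvC2 ax && pvC3 ax

theorem pvStepD_eq : pvStepD = fun s pr => if pvCD pr.2 then PySem.Set.add s pr.2 else s := by
  funext s pr
  unfold pvStepD pvCD
  by_cases h1 : pvC1 pr.2 = true <;> by_cases h2 : pvC2 pr.2 = true <;> simp [h1, h2]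

theorem pvStepF_eq : pvStepF = fun s pr => if pvCF pr.2 then PySem.Set.add s pr.2 else s := by
  funext s pr
  unfold pvStepF pvCF
  by_cases h1 : pvC1 pr.2 = true <;> by_cases h2 : pvC2 pr.2 = true <;>
    by_cases h3 : pvC3 pr.2 = true <;> simp [h1, h2, h3]

-- the second components of pvP form pvF
theorem pvP_map_snd (l : List (String × List String)) : (pvP l).map (·.2) = pvF l := by
  simp [pvP, pvF, List.map_flatMap]

-- a conditional-add fold over pvP yields the set of the filtered dedup stream
theorem pvFoldP_cond_add (p : String → Bool) (l : List (String × List String)) :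
    (pvP l).foldl (fun s pr => if p pr.2 then PySem.Set.add s pr.2 else s) PySem.Set.empty
      = PySem.Set.ofList ((pvF l).filter p) := by
  rw [← pvFold_cond_add, ← pvP_map_snd, List.foldl_map]

-- pointwise equality of the else-branch conditions with the plain ones
theorem pvCD_eq_C2 : pvCD = pvC2 := by
  funext x
  by_cases h : pvC2 x = true
  · simp [pvCD, h, pvC2_imp_not_C1 x h]
  · simp [pvCD, Bool.eq_false_iff.mpr h, h]

theorem pvCF_eq_C3 : pvCF = pvC3 := by
  funext x
  by_cases h : pvC3 x = true
  · obtain ⟨h1, h2⟩ := pvC3_imp_not_C12 x h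
    simp [pvCF, h, h1, h2]
  · simp [pvCF, Bool.eq_false_iff.mpr h, h]

-- A's universe fold is the set of the flat stream
theorem pvAll_update (l : List (String × List String)) (s : PySem.Set String) :
    l.foldl (fun s p => PySem.Set.update s p.2) s = PySem.Set.update s (pvG l) := by
  induction l generalizing s with
  | nil => rfl
  | cons p l ih =>
      rw [List.foldl_cons, ih, show pvG (p :: l) = p.2 ++ pvG l from rfl, PySem.Set.update_append]

theorem pvAll_eq (l : List (String × List String)) :
    l.foldl (fun s p => PySem.Set.update s p.2) PySem.Set.empty = PySem.Set.ofList (pvG l) := by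
  rw [pvAll_update]
  exact PySem.Set.update_nil_left _

-- the three classified-set components agree
theorem pvComp_eq (p : String → Bool) (l : List (String × List String)) :
    PySem.Set.ofList ((pvF l).filter p) = (PySem.Set.ofList (pvG l)).filter p := by
  rw [pvOfList_filter, pvOfList_F_eq_G]

-- A's triple diff is a single filter by pvCU
theorem pvUnexp_eq (l : List (String × List String)) :
    PySem.Set.diff (PySem.Set.diff (PySem.Set.diff (PySem.Set.ofList (pvG l)) pvBuiltinAxioms)
        pvDocumentedAxioms) pvForbiddenAxioms
      = (PySem.Set.ofList (pvG l)).filter pvCU := by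
  show ((((PySem.Set.ofList (pvG l)).filter _).filter _).filter _) = _
  rw [List.filter_filter, List.filter_filter]
  apply List.filter_congr
  intro x _
  simp only [PySem.Set.contains_eq_listContains]
  unfold pvCU pvC1 pvC2 pvC3
  cases h1 : pvBuiltinAxioms.contains x <;> cases h2 : pvDocumentedAxioms.contains x <;>
    cases h3 : pvForbiddenAxioms.contains x <;> simp [h1, h2, h3]

-- the (axiom, theorem) stream feeding B's unexpected-usage dict
def pvQ (l : List (String × List String)) : List (String × String) :=
  ((pvP l).filter (fun pr => pvCU pr.2)).map (fun pr => (pr.2, pr.1))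

-- B's dict fold, rephrased over pvQ
theorem pvFoldU_eq (l : List (String × List String)) :
    (pvP l).foldl pvStepU PySem.Dict.empty
      = (pvQ l).foldl (fun d q => d.modify q.1 [] (· ++ [q.2])) PySem.Dict.empty := by
  have hs : pvStepU = fun (d : PySem.Dict String (List String)) (pr : String × String) =>
      if pvCU pr.2 then d.modify pr.2 [] (· ++ [pr.1]) else d := rfl
  rw [hs, ← List.foldl_filter, pvQ, List.foldl_map]

theorem pvQ_map_fst (l : List (String × List String)) :
    (pvQ l).map (·.1) = (pvF l).filter pvCU := by
  rw [pvQ, List.map_map, ← pvP_map_snd, List.filter_map]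
  rfl

theorem pvUKeys (l : List (String × List String)) :
    ((pvQ l).foldl (fun d q => d.modify q.1 [] (· ++ [q.2])) (PySem.Dict.empty : PySem.Dict String (List String))).keys
      = PySem.Set.ofList ((pvF l).filter pvCU) := by
  rw [PySem.Dict.keys_foldl_modify_key,
    show (PySem.Dict.empty : PySem.Dict String (List String)).keys = [] from rfl,
    PySem.Set.update_nil_left, pvQ_map_fst]

theorem pvUKeysNodup (l : List (String × List String)) :
    ((pvQ l).foldl (fun d q => d.modify q.1 [] (· ++ [q.2])) (PySem.Dict.empty : PySem.Dict String (List String))).keys.Nodup := by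
  apply PySem.Dict.nodup_keys_foldl_modify_key
  exact PySem.Dict.nodup_keys_empty

theorem pvUGetD (l : List (String × List String)) (c : String) :
    ((pvQ l).foldl (fun d q => d.modify q.1 [] (· ++ [q.2])) (PySem.Dict.empty : PySem.Dict String (List String))).getD c []
      = ((pvQ l).filter (fun q => q.1 == c)).map (·.2) := by
  rw [PySem.Dict.getD_foldl_modify_append]
  simp

-- per-theorem contribution to the usage value of an unexpected axiom c
theorem pvBlockVal' (t c : String) (ys : List String) (hnd : ys.Nodup) (hc : pvCU c = true) :
    ((((ys.map (fun ax => (t, ax))).filter (fun pr => pvCU pr.2)).map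
        (fun pr => (pr.2, pr.1))).filter (fun q => q.1 == c)).map (·.2)
      = if ys.contains c then [t] else [] := by
  induction ys with
  | nil => rfl
  | cons y ys ih =>
      rw [List.nodup_cons] at hnd
      rw [List.map_cons, List.filter_cons, List.contains_cons]
      by_cases hy : y = c
      · subst hy
        have hyc : ys.contains y = false := by
          rw [Bool.eq_false_iff, Ne, List.contains_eq_mem, decide_eq_true_eq]; exact hnd.1
        have : pvCU ((t, y).2) = true := hc
        rw [if_pos this, List.map_cons, List.filter_cons]
        have : (((t, y).2, (t, y).1).1 == y) = true := by simp
        rw [if_pos this, List.map_cons, ih hnd.2, hyc]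
        simp
      · have hb2 : (y == c) = false := by simp [hy]
        have htail : ((((ys.map (fun ax => (t, ax))).filter (fun pr => pvCU pr.2)).map
            (fun pr => (pr.2, pr.1))).filter (fun q => q.1 == c)).map (·.2)
            = if ys.contains c then [t] else [] := ih hnd.2
        by_cases hcu : pvCU ((t, y).2) = true
        · rw [if_pos hcu, List.map_cons, List.filter_cons]
          have : ((((t, y).2, (t, y).1).1 == c)) = false := hb2
          rw [this]
          have hb3 : (c == y) = false := by simp [Ne.symm hy]
          simp only [Bool.false_eq_true, if_false, htail, hb3, Bool.false_or]
        · have hb3 : (c == y) = false := by simp [Ne.symm hy]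
          rw [if_neg hcu, htail, hb3, Bool.false_or]

theorem pvBlockVal (t c : String) (as : List String) (hc : pvCU c = true) :
    (((((PySem.List.dedup as).map (fun ax => (t, ax))).filter (fun pr => pvCU pr.2)).map
        (fun pr => (pr.2, pr.1))).filter (fun q => q.1 == c)).map (·.2)
      = if as.contains c then [t] else [] := by
  rw [pvBlockVal' t c _ (PySem.List.nodup_dedup as) hc]
  by_cases hm : c ∈ as
  · rw [if_pos, if_pos] <;>
      simp [List.contains_eq_mem, PySem.List.mem_dedup, hm]
  · rw [if_neg, if_neg] <;>
      simp [List.contains_eq_mem, PySem.List.mem_dedup, hm]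

-- the usage value lists agree
theorem pvVal_eq (l : List (String × List String)) (c : String) (hc : pvCU c = true) :
    ((pvQ l).filter (fun q => q.1 == c)).map (·.2)
      = (l.filter (fun p => p.2.contains c)).map (·.1) := by
  induction l with
  | nil => rfl
  | cons p l ih =>
      have hP : pvP (p :: l) = (PySem.List.dedup p.2).map (fun ax => (p.1, ax)) ++ pvP l := by
        simp [pvP]
      rw [pvQ, hP, List.filter_append, List.map_append, List.filter_append, List.map_append]
      rw [show ((pvP l).filter (fun pr => pvCU pr.2)).map (fun pr => (pr.2, pr.1)) = pvQ l from rfl, ih]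
      rw [pvBlockVal p.1 c p.2 hc]
      by_cases hm : c ∈ p.2 <;> simp [List.filter_cons, List.contains_eq_mem, hm]

-- items of A's fresh-insert fold
theorem pvInsertItems (u : List String) (vals : String → List String) (h : u.Nodup) :
    (u.foldl (fun d ax => d.insert ax (vals ax)) (PySem.Dict.empty : PySem.Dict String (List String))).items
      = u.map (fun ax => (ax, vals ax)) := by
  rw [PySem.Dict.items_foldl_insert_fresh (k := fun a => a)]
  · rfl
  · intro a _; exact PySem.Dict.contains_empty _
  · simpa using h

theorem pvMain (l : List (String × List String)) :
    classify_axioms l = classify_axioms_alt l := by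
  have hB : classify_axioms_alt l =
      ((pvP l).foldl pvStepB PySem.Set.empty, (pvP l).foldl pvStepD PySem.Set.empty,
       (pvP l).foldl pvStepF PySem.Set.empty,
       ((pvP l).foldl pvStepU PySem.Dict.empty).items) := by
    simp only [classify_axioms_alt]
    rw [pvAlt_flat, pvFoldl_split]
  have h1 : (pvP l).foldl pvStepB PySem.Set.empty
      = PySem.Set.inter (PySem.Set.ofList (pvG l)) pvBuiltinAxioms := by
    rw [show pvStepB = (fun s pr => if pvC1 pr.2 then PySem.Set.add s pr.2 else s) from rfl,
      pvFoldP_cond_add, pvComp_eq]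
    rfl
  have h2 : (pvP l).foldl pvStepD PySem.Set.empty
      = PySem.Set.inter (PySem.Set.ofList (pvG l)) pvDocumentedAxioms := by
    rw [pvStepD_eq, pvFoldP_cond_add, pvCD_eq_C2, pvComp_eq]
    rfl
  have h3 : (pvP l).foldl pvStepF PySem.Set.empty
      = PySem.Set.inter (PySem.Set.ofList (pvG l)) pvForbiddenAxioms := by
    rw [pvStepF_eq, pvFoldP_cond_add, pvCF_eq_C3, pvComp_eq]
    rfl
  have h4 : ((pvP l).foldl pvStepU PySem.Dict.empty).items
      = ((PySem.Set.ofList (pvG l)).filter pvCU).map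
          (fun ax => (ax, (l.filter (fun p => p.2.contains ax)).map (·.1))) := by
    rw [pvFoldU_eq, PySem.Dict.items_eq_map_keys _ (pvUKeysNodup l) [], pvUKeys, pvComp_eq]
    apply List.map_congr_left
    intro ax hax
    have hcu : pvCU ax = true := by
      rw [List.mem_filter] at hax
      exact hax.2
    rw [pvUGetD, pvVal_eq l ax hcu]
  have hA : classify_axioms l =
      (PySem.Set.inter (PySem.Set.ofList (pvG l)) pvBuiltinAxioms,
       PySem.Set.inter (PySem.Set.ofList (pvG l)) pvDocumentedAxioms,
       PySem.Set.inter (PySem.Set.ofList (pvG l)) pvForbiddenAxioms,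
       ((PySem.Set.ofList (pvG l)).filter pvCU).map
         (fun ax => (ax, (l.filter (fun p => p.2.contains ax)).map (·.1)))) := by
    simp only [classify_axioms]
    rw [pvAll_eq, pvUnexp_eq]
    refine congrArg _ (congrArg _ (congrArg _ ?_))
    exact pvInsertItems _ _ (((PySem.Set.nodup_ofList (pvG l))).filter _)
  rw [hA, hB, h1, h2, h3, h4]

-- ===== VERDICT (by name: the statement is the Claim_ definition above) =====
theorem classify_axioms_spec : Claim_equal_classify_axioms := by
  intro l _
  show classify_axioms l = classify_axioms_alt l
  exact pvMain l
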